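-- pv_equiv track=rewrite | github.com/EcoRangersX/EcoBuddy | backend/app/services/air_data.py | get_aqi_status
-- ===== SOURCE A (Python) =====
-- def get_aqi_status(aqi):
--     aqi_levels = {
--         50: 'Good',
--         100: 'Moderate',
--         150: 'Unhealthy for sensitive groups',
--         200: 'Unhealthy',
--         300: 'Very unhealthy',
--         500: 'Hazardous'
--     }
--
--     for level in aqi_levels.keys():
--         if aqi > level:
--             if level == 500:
--                 aqi_status = aqi_levels[level]
--                 break
--
--             continue
--         aqi_status = aqi_levels[level]
--         break
--
--
--     return aqi_status
-- ===== SOURCE B (Python) =====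
-- import bisect
--
-- _THRESHOLDS = [50, 100, 150, 200, 300, 500]
-- _LABELS = ['Good', 'Moderate', 'Unhealthy for sensitive groups',
--            'Unhealthy', 'Very unhealthy', 'Hazardous']
--
-- def get_aqi_status(aqi):
--     idx = min(bisect.bisect_left(_THRESHOLDS, aqi), 5)
--     return _LABELS[idx]
-- ===== Notes on version B (the rewrite author's own statement) =====
-- stated objective: idiomatic
-- what changed: Replaced the scan-and-break loop over a dict (with a special-cased >500 branch) by a bisect_left binary search into a threshold table with a clamped label lookup.
import Mathlib
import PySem

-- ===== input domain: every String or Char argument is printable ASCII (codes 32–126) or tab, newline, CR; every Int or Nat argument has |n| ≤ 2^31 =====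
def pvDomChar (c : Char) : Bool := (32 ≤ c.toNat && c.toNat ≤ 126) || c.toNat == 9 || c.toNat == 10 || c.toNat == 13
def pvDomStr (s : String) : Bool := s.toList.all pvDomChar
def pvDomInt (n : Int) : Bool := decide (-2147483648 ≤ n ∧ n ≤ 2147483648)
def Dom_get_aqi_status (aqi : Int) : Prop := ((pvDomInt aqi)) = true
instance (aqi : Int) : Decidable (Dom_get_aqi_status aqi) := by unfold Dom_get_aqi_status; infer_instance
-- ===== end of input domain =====

-- B replaces A's scan-and-break loop over a dict by a table lookup indexed by
-- bisect_left into a threshold list (objective: idiomatic).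

-- ===== PORT A =====
-- A's dict in insertion order, as the loop iterates over its items.
def pvLevelsA : List (Int × String) :=
  [(50, "Good"), (100, "Moderate"), (150, "Unhealthy for sensitive groups"),
   (200, "Unhealthy"), (300, "Very unhealthy"), (500, "Hazardous")]

-- the for-loop over aqi_levels.keys(); "" is the unreachable fall-through
-- (the loop always breaks before exhausting the keys).
def pvLoopA (aqi : Int) : List (Int × String) → String
  | [] => ""
  | (level, label) :: rest =>
      if aqi > level then
        if level == 500 then label else pvLoopA aqi rest
      else label

def get_aqi_status (aqi : Int) : String := pvLoopA aqi pvLevelsA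

-- ===== PORT B =====
def pvThresholds : List Int := [50, 100, 150, 200, 300, 500]
def pvLabels : List String :=
  ["Good", "Moderate", "Unhealthy for sensitive groups",
   "Unhealthy", "Very unhealthy", "Hazardous"]

-- bisect.bisect_left on a sorted list = number of elements strictly below x
def pvBisectLeft (l : List Int) (x : Int) : Nat := l.countP (fun t => decide (t < x))

def get_aqi_status_alt (aqi : Int) : String :=
  pvLabels.getD (min (pvBisectLeft pvThresholds aqi) 5) ""

-- ===== PRECONDITION & SPEC =====
def Spec_get_aqi_status (aqi : Int) (out : String) : Prop := out = get_aqi_status_alt aqi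
instance (aqi : Int) (out : String) : Decidable (Spec_get_aqi_status aqi out) := by unfold Spec_get_aqi_status; infer_instance

-- ===== CLAIM (what is proved, stated in full; the proofs are below) =====
def Claim_equal_get_aqi_status : Prop := ∀ (aqi : Int), Dom_get_aqi_status aqi → Spec_get_aqi_status aqi (get_aqi_status aqi)

-- ===== LEMMAS AND PROOFS =====
theorem pv_eval (aqi : Int) : get_aqi_status aqi = get_aqi_status_alt aqi := by
  rcases Int.lt_or_le 50 aqi with h1 | h1
  rcases Int.lt_or_le 100 aqi with h2 | h2
  rcases Int.lt_or_le 150 aqi with h3 | h3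
  rcases Int.lt_or_le 200 aqi with h4 | h4
  rcases Int.lt_or_le 300 aqi with h5 | h5
  rcases Int.lt_or_le 500 aqi with h6 | h6
  all_goals
    simp_all [get_aqi_status, get_aqi_status_alt, pvLoopA, pvLevelsA,
      pvBisectLeft, pvThresholds, pvLabels, List.countP_cons, List.countP_nil]
  all_goals (split_ifs <;> first | omega | norm_num)

-- ===== VERDICT (by name: the statement is the Claim_ definition above) =====
theorem get_aqi_status_spec : Claim_equal_get_aqi_status := by
  intro aqi _
  exact pv_eval aqi
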